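-- pv_equiv track=rewrite | github.com/GogoPro27/AI_2024 | ExamExercises/csp_new/NxN_queens.py | get_diagonals
-- ===== SOURCE A (Python) =====
-- def get_diagonals(pole, n):
--     x, y = pole
--     diagonals = []
--     while 0 <= x < n and 0 <= y < n:
--         diagonals.append((x, y))
--         x -= 1
--         y += 1
--     x, y = pole
--     while 0 <= x < n and 0 <= y < n:
--         diagonals.append((x, y))
--         x -= 1
--         y -= 1
--     return diagonals
-- ===== SOURCE B (Python) =====
-- def get_diagonals(pole, n):
--     x0, y0 = pole
--     if not (0 <= x0 < n and 0 <= y0 < n):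
--         return []
--     len_up = min(x0 + 1, n - y0)
--     len_down = min(x0, y0) + 1
--     return [(x0 - k, y0 + k) for k in range(len_up)] + \
--            [(x0 - k, y0 - k) for k in range(len_down)]
-- ===== Notes on version B (the rewrite author's own statement) =====
-- stated objective: simpler
-- what changed: Replaced the two boundary-probing while loops with an out-of-bounds guard plus closed-form diagonal lengths (min(x0+1, n-y0) and min(x0,y0)+1) and two range comprehensions that generate the cells arithmetically.
import Mathlib
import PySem

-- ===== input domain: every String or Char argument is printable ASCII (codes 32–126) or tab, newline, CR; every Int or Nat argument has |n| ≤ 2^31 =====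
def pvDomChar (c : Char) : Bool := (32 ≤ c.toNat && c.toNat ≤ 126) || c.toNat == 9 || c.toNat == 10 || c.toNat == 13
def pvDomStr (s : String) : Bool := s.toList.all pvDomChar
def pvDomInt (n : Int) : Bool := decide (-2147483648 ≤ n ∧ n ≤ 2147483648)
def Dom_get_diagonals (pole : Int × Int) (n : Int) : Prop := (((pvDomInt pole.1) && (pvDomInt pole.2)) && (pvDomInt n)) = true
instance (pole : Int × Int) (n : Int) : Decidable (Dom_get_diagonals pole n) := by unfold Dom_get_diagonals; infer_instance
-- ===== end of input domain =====

-- B replaces A's two boundary-probing while loops by closed-form diagonal lengths and two range comprehensions (objective: simpler).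

-- ===== PORT A =====
-- first while loop: step (x-1, y+1)
def pvLoopUp (x y n : Int) : List (Int × Int) :=
  if _h : 0 ≤ x ∧ x < n ∧ 0 ≤ y ∧ y < n then
    (x, y) :: pvLoopUp (x - 1) (y + 1) n
  else []
termination_by (x + 1).toNat
decreasing_by omega

-- second while loop: step (x-1, y-1)
def pvLoopDown (x y n : Int) : List (Int × Int) :=
  if _h : 0 ≤ x ∧ x < n ∧ 0 ≤ y ∧ y < n then
    (x, y) :: pvLoopDown (x - 1) (y - 1) n
  else []
termination_by (x + 1).toNat
decreasing_by omega

def get_diagonals (pole : Int × Int) (n : Int) : List (Int × Int) :=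
  pvLoopUp pole.1 pole.2 n ++ pvLoopDown pole.1 pole.2 n

-- ===== PORT B =====
def get_diagonals_alt (pole : Int × Int) (n : Int) : List (Int × Int) :=
  if 0 ≤ pole.1 ∧ pole.1 < n ∧ 0 ≤ pole.2 ∧ pole.2 < n then
    (PySem.List.pyRange 0 (min (pole.1 + 1) (n - pole.2)) 1).map
      (fun k => (pole.1 - k, pole.2 + k)) ++
    (PySem.List.pyRange 0 (min pole.1 pole.2 + 1) 1).map
      (fun k => (pole.1 - k, pole.2 - k))
  else []

-- ===== PRECONDITION & SPEC =====
def Spec_get_diagonals (pole : Int × Int) (n : Int) (out : List (Int × Int)) : Prop := out = get_diagonals_alt pole n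
instance (pole : Int × Int) (n : Int) (out : List (Int × Int)) : Decidable (Spec_get_diagonals pole n out) := by unfold Spec_get_diagonals; infer_instance

-- ===== CLAIM (what is proved, stated in full; the proofs are below) =====
def Claim_equal_get_diagonals : Prop := ∀ (pole : Int × Int) (n : Int), Dom_get_diagonals pole n → Spec_get_diagonals pole n (get_diagonals pole n)

-- ===== LEMMAS AND PROOFS =====

lemma pvLoopUp_eq (m : Nat) : ∀ (x y n : Int), 0 ≤ x → x < n → 0 ≤ y → y < n →
    (m : Int) = min (x + 1) (n - y) →
    pvLoopUp x y n = (List.range m).map (fun (k : Nat) => (x - (k : Int), y + (k : Int))) := by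
  induction m with
  | zero => intro x y n hx hxn hy hyn hm; omega
  | succ m ih =>
    intro x y n hx hxn hy hyn hm
    rw [pvLoopUp]
    simp only [hx, hxn, hy, hyn, and_self, dif_pos]
    rw [List.range_succ_eq_map, List.map_cons, List.map_map]
    congr 1
    · simp
    rcases Nat.eq_zero_or_pos m with h0 | hpos
    · subst h0
      rw [pvLoopUp, dif_neg (show ¬ (0 ≤ x - 1 ∧ x - 1 < n ∧ 0 ≤ y + 1 ∧ y + 1 < n) by omega)]
      simp
    · rw [ih (x - 1) (y + 1) n (by omega) (by omega) (by omega) (by omega) (by omega)]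
      refine List.map_congr_left (fun k _ => ?_)
      simp only [Function.comp_apply, Prod.mk.injEq, Nat.succ_eq_add_one]
      push_cast
      constructor <;> ring

lemma pvLoopDown_eq (m : Nat) : ∀ (x y n : Int), 0 ≤ x → x < n → 0 ≤ y → y < n →
    (m : Int) = min x y + 1 →
    pvLoopDown x y n = (List.range m).map (fun (k : Nat) => (x - (k : Int), y - (k : Int))) := by
  induction m with
  | zero => intro x y n hx hxn hy hyn hm; omega
  | succ m ih =>
    intro x y n hx hxn hy hyn hm
    rw [pvLoopDown]
    simp only [hx, hxn, hy, hyn, and_self, dif_pos]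
    rw [List.range_succ_eq_map, List.map_cons, List.map_map]
    congr 1
    · simp
    rcases Nat.eq_zero_or_pos m with h0 | hpos
    · subst h0
      rw [pvLoopDown, dif_neg (show ¬ (0 ≤ x - 1 ∧ x - 1 < n ∧ 0 ≤ y - 1 ∧ y - 1 < n) by omega)]
      simp
    · rw [ih (x - 1) (y - 1) n (by omega) (by omega) (by omega) (by omega) (by omega)]
      refine List.map_congr_left (fun k _ => ?_)
      simp only [Function.comp_apply, Prod.mk.injEq, Nat.succ_eq_add_one]
      push_cast
      constructor <;> ring

-- ===== VERDICT (by name: the statement is the Claim_ definition above) =====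
theorem get_diagonals_spec : Claim_equal_get_diagonals := by
  intro pole n _
  unfold Spec_get_diagonals get_diagonals get_diagonals_alt
  obtain ⟨x, y⟩ := pole
  by_cases h : 0 ≤ x ∧ x < n ∧ 0 ≤ y ∧ y < n
  · obtain ⟨hx, hxn, hy, hyn⟩ := h
    simp only [hx, hxn, hy, hyn, and_self, if_pos]
    have h1 : ((min (x + 1) (n - y)).toNat : Int) = min (x + 1) (n - y) := by omega
    have h2 : ((min x y + 1).toNat : Int) = min x y + 1 := by omega
    rw [pvLoopUp_eq (min (x + 1) (n - y)).toNat x y n hx hxn hy hyn h1,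
        pvLoopDown_eq (min x y + 1).toNat x y n hx hxn hy hyn h2,
        ← h1, ← h2, PySem.List.pyRange_zero_natCast, PySem.List.pyRange_zero_natCast,
        List.map_map, List.map_map]
    have e1 : (max (min (x + 1) (n - y)) 0).toNat = (min (x + 1) (n - y)).toNat := by omega
    have e2 : (max (min x y + 1) 0).toNat = (min x y + 1).toNat := by omega
    simp [Function.comp_def, e1, e2]
  · rw [pvLoopUp, pvLoopDown]
    simp [h]
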